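-- pv_equiv track=rewrite | github.com/rceuls/snake_advent | snek_advent/day_14.py | update_line
-- ===== SOURCE A (Python) =====
-- ROUNDED = "O"
--
-- CUBED = "#"
--
-- EMPTY = "."
--
-- EOL = "EOL"
--
-- LEFT = "L"
--
-- RIGHT = "R"
--
-- def get_stone_or_skip(start_index: int, line: str):
--     substr = line[start_index:]
--     for ix, char in zip(range(len(substr)), substr):
--         if char == ROUNDED or char == CUBED:
--             return (ix + start_index, substr[ix])
--     return (-1, EOL)
--
-- def update_line(line: str, drop_to_the: LEFT or RIGHT):
--     working_copy = list(line)
--     if drop_to_the == RIGHT: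
--         working_copy = list(line[::-1])
--     for x in range(len(working_copy)):
--         if working_copy[x] == EMPTY:
--             (index, type) = get_stone_or_skip(x, working_copy)
--             if type == ROUNDED:
--                 working_copy[index] = EMPTY
--                 working_copy[x] = ROUNDED
--             elif type == CUBED:
--                 x = index
--     if drop_to_the == RIGHT:
--         return working_copy[::-1]
--     return working_copy
-- ===== SOURCE B (Python) =====
-- ROUNDED = "O"
-- CUBED = "#"
-- EMPTY = "."
-- RIGHT = "R"
--
--
-- def _count_stones(cells, i):
--     # number of rounded stones from index i up to the next cube barrier
--     k = 0
--     while i < len(cells) and cells[i] != CUBED: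
--         if cells[i] == ROUNDED:
--             k += 1
--         i += 1
--     return k
--
--
-- def update_line(line, drop_to_the):
--     cells = list(line[::-1] if drop_to_the == RIGHT else line)
--     out = []
--     k = _count_stones(cells, 0)
--     for i, c in enumerate(cells):
--         if c == CUBED:
--             out.append(CUBED)
--             k = _count_stones(cells, i + 1)
--         elif c == EMPTY or c == ROUNDED:
--             if k > 0:
--                 out.append(ROUNDED)
--                 k -= 1
--             else:
--                 out.append(EMPTY)
--         else:
--             out.append(c)
--     if drop_to_the == RIGHT:
--         out.reverse()
--     return out
-- ===== Notes on version B (the rewrite author's own statement) =====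
-- stated objective: alternative
-- what changed: A rescans the suffix from every empty cell to find the next stone to pull in; B makes a single pass that pre-counts the rounded stones of each '#'-delimited segment and emits them greedily into the '.'/'O' slots.
import Mathlib
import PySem

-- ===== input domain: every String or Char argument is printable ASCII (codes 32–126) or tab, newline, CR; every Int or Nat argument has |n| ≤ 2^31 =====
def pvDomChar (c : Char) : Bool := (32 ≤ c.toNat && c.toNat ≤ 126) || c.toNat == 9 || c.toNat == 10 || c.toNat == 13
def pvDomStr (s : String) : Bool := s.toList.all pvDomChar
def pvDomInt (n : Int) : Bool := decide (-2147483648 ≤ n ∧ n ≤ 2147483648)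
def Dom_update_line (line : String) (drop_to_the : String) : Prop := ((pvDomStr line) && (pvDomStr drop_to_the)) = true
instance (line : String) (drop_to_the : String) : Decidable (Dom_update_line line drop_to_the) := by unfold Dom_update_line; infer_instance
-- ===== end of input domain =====

-- B replaces A's rescan-from-each-empty-cell loop with a single pass that pre-counts the
-- rounded stones of each '#'-delimited segment and emits them greedily (objective: alternative).
-- Both sides model the working copy as List Char; list(line) yields 1-char strings, which are
-- produced by the final `.map (fun c => String.ofList [c])` (exact: every element is one character).

-- ===== PORT A =====
-- for ix, char in zip(range(len(substr)), substr): return (ix + start_index, substr[ix]) on O/#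
def gsosAux : Nat → List Char → Int × String
  | _, [] => (-1, "EOL")
  | ix, c :: rest =>
    if c = 'O' ∨ c = '#' then ((ix : Int), String.ofList [c]) else gsosAux (ix + 1) rest

-- substr = line[start_index:]; scan it (start_index is the loop index x, always a valid Nat)
def get_stone_or_skip (start_index : Nat) (l : List Char) : Int × String :=
  gsosAux start_index (l.drop start_index)

-- for x in range(len(working_copy)): … ; the CUBED branch's 'x = index' rebinds the loop
-- variable, which range() overwrites on the next iteration, so both the CUBED and the EOL
-- outcome just continue with x+1.
def aLoop (wc : List Char) (x : Nat) : List Char :=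
  if h : x < wc.length then
    if wc[x] = '.' then
      let p := get_stone_or_skip x wc
      if p.2 = "O" then
        -- working_copy[index] = EMPTY; working_copy[x] = ROUNDED
        -- p.1 = ix + start_index ≥ 0 here, so toNat is exact (never a negative index)
        aLoop ((wc.set p.1.toNat '.').set x 'O') (x + 1)
      else
        aLoop wc (x + 1)
    else aLoop wc (x + 1)
  else wc
termination_by wc.length - x
decreasing_by all_goals (try simp only [List.length_set]); all_goals omega

def update_line (line : String) (drop_to_the : String) : List String :=
  -- working_copy = list(line); if drop_to_the == RIGHT: working_copy = list(line[::-1])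
  let working_copy := if drop_to_the = "R" then line.toList.reverse else line.toList
  let res := aLoop working_copy 0
  (if drop_to_the = "R" then res.reverse else res).map (fun c => String.ofList [c])

-- ===== PORT B =====
-- _count_stones(cells, i): rounded stones from i up to the next cube; ported on the suffix list
def countStones : List Char → Nat
  | [] => 0
  | c :: rest => if c = '#' then 0 else (if c = 'O' then 1 else 0) + countStones rest

-- the enumerate loop of Source B: state k, output built front-to-back
def bLoop : Nat → List Char → List Char
  | _, [] => []
  | k, c :: rest =>
    if c = '#' then '#' :: bLoop (countStones rest) rest
    else if c = '.' ∨ c = 'O' then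
      if 0 < k then 'O' :: bLoop (k - 1) rest else '.' :: bLoop k rest
    else c :: bLoop k rest

def update_line_alt (line : String) (drop_to_the : String) : List String :=
  let cells := if drop_to_the = "R" then line.toList.reverse else line.toList
  let out := (bLoop (countStones cells) cells).map (fun c => String.ofList [c])
  if drop_to_the = "R" then out.reverse else out

-- ===== PRECONDITION & SPEC =====
def Spec_update_line (line : String) (drop_to_the : String) (out : List String) : Prop := out = update_line_alt line drop_to_the
instance (line : String) (drop_to_the : String) (out : List String) : Decidable (Spec_update_line line drop_to_the out) := by unfold Spec_update_line; infer_instance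

-- ===== CLAIM (what is proved, stated in full; the proofs are below) =====
def Claim_equal_update_line : Prop := ∀ (line : String) (drop_to_the : String), Dom_update_line line drop_to_the → Spec_update_line line drop_to_the (update_line line drop_to_the)

-- ===== LEMMAS AND PROOFS =====

-- index of the first 'O' before any '#': the abstract content of get_stone_or_skip
def findO : List Char → Option Nat
  | [] => none
  | c :: rest =>
    if c = '#' then none
    else if c = 'O' then some 0
    else (findO rest).map (· + 1)

-- one step of A's outer loop, expressed structurally on the suffix from x
def gfun : List Char → List Char
  | [] => []
  | c :: rest =>
    if c = '.' then
      match findO rest with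
      | some j => 'O' :: gfun (rest.set j '.')
      | none => '.' :: gfun rest
    else c :: gfun rest
termination_by l => l.length
decreasing_by all_goals simp [List.length_set]

theorem findO_none_count (l : List Char) (h : findO l = none) : countStones l = 0 := by
  induction l with
  | nil => rfl
  | cons c rest ih =>
    by_cases h1 : c = '#'
    · simp [countStones, h1]
    · by_cases h2 : c = 'O'
      · simp [findO, h2] at h
      · simp only [findO, if_neg h1, if_neg h2, Option.map_eq_none_iff] at h
        simp [countStones, h1, h2, ih h]

theorem findO_some_pos (l : List Char) (j : Nat) (h : findO l = some j) : 0 < countStones l := by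
  induction l generalizing j with
  | nil => simp [findO] at h
  | cons c rest ih =>
    by_cases h1 : c = '#'
    · simp [findO, h1] at h
    · by_cases h2 : c = 'O'
      · simp [countStones, h2]
      · simp only [findO, if_neg h1, if_neg h2, Option.map_eq_some_iff] at h
        obtain ⟨j', hj', _⟩ := h
        have := ih j' hj'
        simp only [countStones, if_neg h1]
        omega

theorem findO_some_get (l : List Char) (j : Nat) (h : findO l = some j) : l[j]? = some 'O' := by
  induction l generalizing j with
  | nil => simp [findO] at h
  | cons c rest ih =>
    by_cases h1 : c = '#'
    · simp [findO, h1] at h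
    · by_cases h2 : c = 'O'
      · simp only [findO, if_neg h1, if_pos h2, Option.some.injEq] at h
        subst h; subst h2; simp
      · simp only [findO, if_neg h1, if_neg h2, Option.map_eq_some_iff] at h
        obtain ⟨j', hj', hj⟩ := h
        subst hj
        simpa using ih j' hj'

theorem findO_some_nohash (l : List Char) (j : Nat) (h : findO l = some j) :
    ∀ i, i < j → l[i]? ≠ some '#' := by
  induction l generalizing j with
  | nil => simp [findO] at h
  | cons c rest ih =>
    by_cases h1 : c = '#'
    · simp [findO, h1] at h
    · by_cases h2 : c = 'O'
      · simp only [findO, if_neg h1, if_pos h2, Option.some.injEq] at h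
        subst h
        intro i hi
        omega
      · simp only [findO, if_neg h1, if_neg h2, Option.map_eq_some_iff] at h
        obtain ⟨j', hj', hj⟩ := h
        subst hj
        intro i hi
        cases i with
        | zero => simpa using h1
        | succ i' => simpa using ih j' hj' i' (by omega)

theorem countStones_set_findO (l : List Char) (j : Nat) (h : findO l = some j) :
    countStones (l.set j '.') + 1 = countStones l := by
  induction l generalizing j with
  | nil => simp [findO] at h
  | cons c rest ih =>
    by_cases h1 : c = '#'
    · simp [findO, h1] at h
    · by_cases h2 : c = 'O'
      · simp only [findO, if_neg h1, if_pos h2, Option.some.injEq] at h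
        subst h; subst h2
        show countStones ('.' :: rest) + 1 = countStones ('O' :: rest)
        simp [countStones]
        omega
      · simp only [findO, if_neg h1, if_neg h2, Option.map_eq_some_iff] at h
        obtain ⟨j', hj', hj⟩ := h
        subst hj
        have := ih j' hj'
        simp only [List.set_cons_succ, countStones, if_neg h1, if_neg h2]
        omega

theorem bLoop_set (l : List Char) (j : Nat) (k : Nat) (hg : l[j]? = some 'O')
    (hh : ∀ i, i < j → l[i]? ≠ some '#') : bLoop k (l.set j '.') = bLoop k l := by
  induction l generalizing j k with
  | nil => simp at hg
  | cons c rest ih =>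
    cases j with
    | zero =>
      simp only [List.getElem?_cons_zero, Option.some.injEq] at hg
      subst hg
      simp [bLoop]
    | succ j' =>
      have hc : c ≠ '#' := by
        have := hh 0 (by omega); simpa using this
      simp only [List.getElem?_cons_succ] at hg
      have hh' : ∀ i, i < j' → rest[i]? ≠ some '#' := fun i hi => by
        have := hh (i + 1) (by omega); simpa using this
      have hrec := fun k => ih j' k hg hh'
      simp only [List.set_cons_succ, bLoop, if_neg hc]
      by_cases hs : c = '.' ∨ c = 'O'
      · rw [if_pos hs, if_pos hs]
        by_cases hk : 0 < k
        · rw [if_pos hk, if_pos hk, hrec (k - 1)]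
        · rw [if_neg hk, if_neg hk, hrec k]
      · rw [if_neg hs, if_neg hs, hrec k]

theorem gfun_eq_bLoop (l : List Char) : gfun l = bLoop (countStones l) l := by
  induction l using gfun.induct with
  | case1 => simp [gfun, bLoop]
  | case2 rest j hj ih =>
    have hpos := findO_some_pos rest j hj
    have hcs := countStones_set_findO rest j hj
    rw [gfun]
    simp only [hj, reduceIte]
    rw [ih, bLoop_set rest j _ (findO_some_get rest j hj) (findO_some_nohash rest j hj)]
    rw [show countStones (rest.set j '.') = countStones rest - 1 from by omega]
    simp [bLoop, countStones, hpos]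
  | case3 rest hj ih =>
    have h0 := findO_none_count rest hj
    rw [gfun]
    simp only [hj, reduceIte]
    simp [bLoop, countStones, ih, h0]
  | case4 c rest hc ih =>
    rw [gfun, if_neg hc]
    by_cases h1 : c = '#'
    · subst h1
      simp [bLoop, ih]
    · by_cases h2 : c = 'O'
      · subst h2
        have hcnt : countStones ('O' :: rest) = countStones rest + 1 := by
          simp [countStones]; omega
        simp [bLoop, hcnt, ih]
      · have hcnt : countStones (c :: rest) = countStones rest := by
          simp [countStones, h1, h2]
        simp [bLoop, hcnt, ih, h1, h2, hc]

theorem gsosAux_some (rest : List Char) (j : Nat) (h : findO rest = some j) :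
    ∀ ix : Nat, gsosAux ix rest = (((ix + j : Nat) : Int), "O") := by
  induction rest generalizing j with
  | nil => simp [findO] at h
  | cons c r ih =>
    intro ix
    by_cases h1 : c = '#'
    · simp [findO, h1] at h
    · by_cases h2 : c = 'O'
      · simp only [findO, if_neg h1, if_pos h2, Option.some.injEq] at h
        subst h; subst h2
        rw [gsosAux, if_pos (Or.inl rfl)]
        simp [show String.ofList ['O'] = "O" from by decide]
      · simp only [findO, if_neg h1, if_neg h2, Option.map_eq_some_iff] at h
        obtain ⟨j', hj', hj⟩ := h
        subst hj
        rw [gsosAux, if_neg (by simp [h1, h2]), ih j' hj' (ix + 1)]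
        congr 2
        omega

theorem gsosAux_none (rest : List Char) (h : findO rest = none) :
    ∀ ix : Nat, (gsosAux ix rest).2 ≠ "O" := by
  induction rest with
  | nil => intro ix; simp [gsosAux]
  | cons c r ih =>
    intro ix
    by_cases h1 : c = '#'
    · subst h1
      rw [gsosAux, if_pos (Or.inr rfl)]
      show String.ofList ['#'] ≠ "O"
      decide
    · by_cases h2 : c = 'O'
      · simp [findO, h2] at h
      · simp only [findO, if_neg h1, if_neg h2, Option.map_eq_none_iff] at h
        rw [gsosAux, if_neg (by simp [h1, h2])]
        exact ih h (ix + 1)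

theorem set_append_last (l1 : List Char) (c a : Char) (n : Nat) (hn : n = l1.length) :
    (l1 ++ [c]).set n a = l1 ++ [a] := by
  subst hn
  induction l1 with
  | nil => rfl
  | cons x xs ih => simp [ih]

theorem take_succ_set (wc : List Char) (x : Nat) (hx : x < wc.length) (a : Char) :
    (wc.take (x + 1)).set x a = wc.take x ++ [a] := by
  have h1 : wc.take (x + 1) = wc.take x ++ [wc[x]] := by
    rw [List.take_add_one]
    simp [List.getElem?_eq_getElem hx]
  have hlen : (wc.take x).length = x := by
    simp [Nat.min_eq_left (Nat.le_of_lt hx)]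
  rw [h1, set_append_last _ _ _ _ hlen.symm]

theorem aLoop_eq_gfun (wc : List Char) (x : Nat) :
    aLoop wc x = wc.take x ++ gfun (wc.drop x) := by
  induction wc, x using aLoop.induct with
  | case1 wc x h hdot p hO ih =>
    -- wc[x] = '.', a rounded stone is found at index x+1+j
    have hp : p = get_stone_or_skip x wc := rfl
    rw [hp] at hO ih
    have hdrop : wc.drop x = wc[x] :: wc.drop (x + 1) := List.drop_eq_getElem_cons h
    rw [hdot] at hdrop
    have hgs : get_stone_or_skip x wc = gsosAux (x + 1) (wc.drop (x + 1)) := by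
      unfold get_stone_or_skip
      rw [hdrop, gsosAux, if_neg (by decide)]
    obtain ⟨j, hj⟩ : ∃ j, findO (wc.drop (x + 1)) = some j := by
      cases hfo : findO (wc.drop (x + 1)) with
      | none =>
        rw [hgs] at hO
        exact absurd hO (gsosAux_none _ hfo (x + 1))
      | some j => exact ⟨j, rfl⟩
    have hpval : get_stone_or_skip x wc = (((x + 1 + j : Nat) : Int), "O") := by
      rw [hgs, gsosAux_some _ j hj (x + 1)]
    rw [aLoop]
    simp only [dif_pos h, if_pos hdot, if_pos hO]
    rw [hpval] at ih ⊢
    simp only [Int.toNat_natCast] at ih ⊢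
    rw [ih]
    have hdrop' : (((wc.set (x + 1 + j) '.').set x 'O').drop (x + 1)) = (wc.drop (x + 1)).set j '.' := by
      rw [List.drop_set, List.drop_set]
      rw [if_pos (by omega : x < x + 1), if_neg (by omega : ¬ x + 1 + j < x + 1)]
      congr 1
      omega
    have htake' : (((wc.set (x + 1 + j) '.').set x 'O').take (x + 1)) = wc.take x ++ ['O'] := by
      rw [List.take_set, List.take_set]
      rw [List.set_eq_of_length_le (l := wc.take (x + 1)) (by simp only [List.length_take]; omega)]
      exact take_succ_set wc x h 'O'
    rw [hdrop', htake', hdrop, gfun, if_pos rfl, hj]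
    simp
  | case2 wc x h hdot p hO ih =>
    -- wc[x] = '.', but the scan hits a cube or the end of the line: nothing moves
    have hp : p = get_stone_or_skip x wc := rfl
    rw [hp] at hO
    have hdrop : wc.drop x = wc[x] :: wc.drop (x + 1) := List.drop_eq_getElem_cons h
    rw [hdot] at hdrop
    have hgs : get_stone_or_skip x wc = gsosAux (x + 1) (wc.drop (x + 1)) := by
      unfold get_stone_or_skip
      rw [hdrop, gsosAux, if_neg (by decide)]
    have hfo : findO (wc.drop (x + 1)) = none := by
      cases hfo : findO (wc.drop (x + 1)) with
      | none => rfl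
      | some j =>
        exfalso
        apply hO
        rw [hgs, gsosAux_some _ j hfo (x + 1)]
    rw [aLoop]
    simp only [dif_pos h, if_pos hdot, if_neg hO]
    rw [ih, hdrop, gfun, if_pos rfl, hfo]
    have htake : wc.take (x + 1) = wc.take x ++ [wc[x]] := by
      rw [List.take_add_one]
      simp [List.getElem?_eq_getElem h]
    rw [htake]
    simp [hdot]
  | case3 wc x h hdot ih =>
    have hdrop : wc.drop x = wc[x] :: wc.drop (x + 1) := List.drop_eq_getElem_cons h
    rw [aLoop]
    simp only [dif_pos h, if_neg hdot]
    rw [ih, hdrop, gfun, if_neg hdot]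
    have htake : wc.take (x + 1) = wc.take x ++ [wc[x]] := by
      rw [List.take_add_one]
      simp [List.getElem?_eq_getElem h]
    rw [htake, List.append_assoc]
    rfl
  | case4 wc x h =>
    rw [aLoop, dif_neg h]
    have hx : wc.length ≤ x := Nat.le_of_not_lt h
    simp [List.take_of_length_le hx, List.drop_of_length_le hx, gfun]

theorem aLoop_eq_bLoop (l : List Char) : aLoop l 0 = bLoop (countStones l) l := by
  have h := aLoop_eq_gfun l 0
  simpa [gfun_eq_bLoop] using h

-- ===== VERDICT (by name: the statement is the Claim_ definition above) =====
theorem update_line_spec : Claim_equal_update_line := by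
  intro line drop_to_the _
  show update_line line drop_to_the = update_line_alt line drop_to_the
  unfold update_line update_line_alt
  by_cases hR : drop_to_the = "R" <;> simp [hR, aLoop_eq_bLoop, List.map_reverse]
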